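-- pv_equiv track=rewrite | github.com/BarbarosAvsar/AutomatedSoftwareDeveloper | automated_software_developer/agent/conformance/runner.py | _diff_checksums
-- ===== SOURCE A (Python) =====
-- def _diff_checksums(
--     checksums_a: dict[str, str],
--     checksums_b: dict[str, str],
-- ) -> list[dict[str, str]]:
--     """Compute checksum differences between two project snapshots."""
--     differences: list[dict[str, str]] = []
--     all_paths = set(checksums_a) | set(checksums_b)
--     for path in sorted(all_paths):
--         if path not in checksums_a:
--             differences.append({"path": path, "reason": "missing_in_run1"})
--             continue
--         if path not in checksums_b:
--             differences.append({"path": path, "reason": "missing_in_run2"})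
--             continue
--         if checksums_a[path] != checksums_b[path]:
--             differences.append({"path": path, "reason": "checksum_mismatch"})
--     return differences
-- ===== SOURCE B (Python) =====
-- def _diff_checksums(
--     checksums_a: dict[str, str],
--     checksums_b: dict[str, str],
-- ) -> list[dict[str, str]]:
--     """Compute checksum differences between two project snapshots."""
--     keys_a, keys_b = set(checksums_a), set(checksums_b)
--     diffs = [{"path": p, "reason": "missing_in_run1"} for p in keys_b - keys_a]
--     diffs += [{"path": p, "reason": "missing_in_run2"} for p in keys_a - keys_b]
--     diffs += [{"path": p, "reason": "checksum_mismatch"}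
--               for p in keys_a & keys_b if checksums_a[p] != checksums_b[p]]
--     return sorted(diffs, key=lambda d: d["path"])
-- ===== Notes on version B (the rewrite author's own statement) =====
-- stated objective: alternative
-- what changed: B partitions the keys with set operations (only-in-b, only-in-a, intersection-with-mismatch), builds each difference group by comprehension and sorts the merged list once by path, instead of A's sort-the-union-first loop that branches per path.
import Mathlib
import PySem

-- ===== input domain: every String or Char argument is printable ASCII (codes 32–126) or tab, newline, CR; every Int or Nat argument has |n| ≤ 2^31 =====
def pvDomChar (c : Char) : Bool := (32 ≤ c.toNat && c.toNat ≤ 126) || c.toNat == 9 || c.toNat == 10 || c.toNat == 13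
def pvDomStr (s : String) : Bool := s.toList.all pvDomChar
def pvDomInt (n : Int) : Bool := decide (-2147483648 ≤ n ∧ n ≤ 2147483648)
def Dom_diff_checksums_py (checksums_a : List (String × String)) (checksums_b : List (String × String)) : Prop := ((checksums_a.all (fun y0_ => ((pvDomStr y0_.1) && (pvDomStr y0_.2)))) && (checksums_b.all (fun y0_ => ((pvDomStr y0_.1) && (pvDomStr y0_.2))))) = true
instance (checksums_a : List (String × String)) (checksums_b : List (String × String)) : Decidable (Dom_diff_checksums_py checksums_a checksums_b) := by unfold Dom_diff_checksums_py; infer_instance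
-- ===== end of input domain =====

-- B partitions the keys into three set-difference/intersection groups and sorts the merged
-- result once, instead of A's sort-all-keys-then-branch loop (objective: alternative decomposition).

-- ===== PORT A =====
-- dict lookup d[k] is first-match lookup on the association list (List.lookup);
-- 'path in d' is membership among the keys (d.map Prod.fst).
def diff_checksums_py (checksums_a : List (String × String)) (checksums_b : List (String × String)) : List (List (String × String)) :=
  let all_paths : PySem.Set String :=
    PySem.Set.union (PySem.Set.ofList (checksums_a.map Prod.fst)) (checksums_b.map Prod.fst)
  (PySem.List.sorted all_paths (fun p => p)).foldl
    (fun diffs path =>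
      if ¬ (path ∈ checksums_a.map Prod.fst) then
        diffs ++ [[("path", path), ("reason", "missing_in_run1")]]
      else if ¬ (path ∈ checksums_b.map Prod.fst) then
        diffs ++ [[("path", path), ("reason", "missing_in_run2")]]
      else if List.lookup path checksums_a ≠ List.lookup path checksums_b then
        diffs ++ [[("path", path), ("reason", "checksum_mismatch")]]
      else diffs)
    []

-- ===== PORT B =====
def diff_checksums_py_alt (checksums_a : List (String × String)) (checksums_b : List (String × String)) : List (List (String × String)) :=
  let keys_a : PySem.Set String := PySem.Set.ofList (checksums_a.map Prod.fst)
  let keys_b : PySem.Set String := PySem.Set.ofList (checksums_b.map Prod.fst)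
  let diffs :=
    (PySem.Set.diff keys_b keys_a).map (fun p => [("path", p), ("reason", "missing_in_run1")])
    ++ (PySem.Set.diff keys_a keys_b).map (fun p => [("path", p), ("reason", "missing_in_run2")])
    ++ ((PySem.Set.inter keys_a keys_b).filter
          (fun p => List.lookup p checksums_a ≠ List.lookup p checksums_b)).map
        (fun p => [("path", p), ("reason", "checksum_mismatch")])
  PySem.List.sorted diffs (fun d => (List.lookup "path" d).getD "")

-- ===== PRECONDITION & SPEC =====
def Spec_diff_checksums_py (checksums_a : List (String × String)) (checksums_b : List (String × String)) (out : List (List (String × String))) : Prop := out = diff_checksums_py_alt checksums_a checksums_b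
instance (checksums_a : List (String × String)) (checksums_b : List (String × String)) (out : List (List (String × String))) : Decidable (Spec_diff_checksums_py checksums_a checksums_b out) := by unfold Spec_diff_checksums_py; infer_instance

-- ===== CLAIM (what is proved, stated in full; the proofs are below) =====
def Claim_equal_diff_checksums_py : Prop := ∀ (checksums_a : List (String × String)) (checksums_b : List (String × String)), Dom_diff_checksums_py checksums_a checksums_b → Spec_diff_checksums_py checksums_a checksums_b (diff_checksums_py checksums_a checksums_b)

-- ===== LEMMAS AND PROOFS =====

-- the per-path branch of A, as a 0-or-1-element list
def pvG (checksums_a checksums_b : List (String × String)) (p : String) : List (List (String × String)) :=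
  if ¬ (p ∈ checksums_a.map Prod.fst) then [[("path", p), ("reason", "missing_in_run1")]]
  else if ¬ (p ∈ checksums_b.map Prod.fst) then [[("path", p), ("reason", "missing_in_run2")]]
  else if List.lookup p checksums_a ≠ List.lookup p checksums_b then [[("path", p), ("reason", "checksum_mismatch")]]
  else []

lemma pvG_key (ca cb : List (String × String)) (p : String) (d : List (String × String))
    (hd : d ∈ pvG ca cb p) : (List.lookup "path" d).getD "" = p := by
  unfold pvG at hd
  split_ifs at hd <;> simp_all

lemma pvG_len (ca cb : List (String × String)) (p : String) : (pvG ca cb p).length ≤ 1 := by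
  unfold pvG; split_ifs <;> simp

lemma pvFlatMap_eq_map {α β : Type} (l : List α) (g : α → List β) (h : α → β)
    (hg : ∀ p ∈ l, g p = [h p]) : l.flatMap g = l.map h := by
  induction l with
  | nil => rfl
  | cons x xs ih =>
    simp only [List.flatMap_cons, List.map_cons, hg x (by simp)]
    rw [ih (fun p hp => hg p (by simp [hp]))]
    rfl

lemma pvFlatMap_ite_eq_filter_map {α β : Type} (l : List α) (g : α → List β)
    (c : α → Bool) (h : α → β)
    (hg : ∀ p ∈ l, g p = if c p then [h p] else []) :
    l.flatMap g = (l.filter c).map h := by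
  induction l with
  | nil => rfl
  | cons x xs ih =>
    simp only [List.flatMap_cons, List.filter_cons, hg x (by simp)]
    rw [ih (fun p hp => hg p (by simp [hp]))]
    by_cases hc : c x = true <;> simp [hc]

lemma pvPairwise_flatMap (l : List String) (hl : l.Pairwise (· < ·))
    (g : String → List (List (String × String))) (key : List (String × String) → String)
    (hk : ∀ p, ∀ d ∈ g p, key d = p) (hlen : ∀ p, (g p).length ≤ 1) :
    (l.flatMap g).Pairwise (fun x y => key x < key y) := by
  induction l with
  | nil => simp
  | cons a as ih =>
    rw [List.pairwise_cons] at hl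
    rw [List.flatMap_cons, List.pairwise_append]
    refine ⟨?_, ih hl.2, ?_⟩
    · have := hlen a
      match hga : g a with
      | [] => simp
      | [d] => simp
      | d1 :: d2 :: t => rw [hga] at this; simp at this
    · intro d hd d' hd'
      rw [List.mem_flatMap] at hd'
      obtain ⟨b, hb, hd'b⟩ := hd'
      rw [hk a d hd, hk b d' hd'b]
      exact hl.1 b hb

-- A's loop computes flatMap of the branch over the sorted union
lemma pvA_eq_flatMap (ca cb : List (String × String)) :
    diff_checksums_py ca cb =
      (PySem.List.sorted
        (PySem.Set.union (PySem.Set.ofList (ca.map Prod.fst)) (cb.map Prod.fst))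
        (fun p => p)).flatMap (pvG ca cb) := by
  unfold diff_checksums_py
  have hstep : (fun (diffs : List (List (String × String))) (path : String) =>
      if ¬ (path ∈ ca.map Prod.fst) then
        diffs ++ [[("path", path), ("reason", "missing_in_run1")]]
      else if ¬ (path ∈ cb.map Prod.fst) then
        diffs ++ [[("path", path), ("reason", "missing_in_run2")]]
      else if List.lookup path ca ≠ List.lookup path cb then
        diffs ++ [[("path", path), ("reason", "checksum_mismatch")]]
      else diffs)
      = (fun diffs path => diffs ++ pvG ca cb path) := by
    funext diffs path
    unfold pvG
    split_ifs <;> simp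
  rw [hstep, PySem.List.foldl_append_eq_flatMap]
  rfl

-- ===== VERDICT (by name: the statement is the Claim_ definition above) =====
theorem diff_checksums_py_spec : Claim_equal_diff_checksums_py := by
  intro ca cb _
  unfold Spec_diff_checksums_py
  set ka : PySem.Set String := PySem.Set.ofList (ca.map Prod.fst) with hka
  set kb : PySem.Set String := PySem.Set.ofList (cb.map Prod.fst) with hkb
  have hkaN : ka.Nodup := PySem.Set.nodup_ofList _
  have hkbN : kb.Nodup := PySem.Set.nodup_ofList _
  set u : PySem.Set String := PySem.Set.union ka (cb.map Prod.fst) with hu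
  have hueq : u = PySem.Set.ofList (ca.map Prod.fst ++ cb.map Prod.fst) := by
    rw [hu, hka, PySem.Set.ofList_append]; rfl
  set key : List (String × String) → String := fun d => (List.lookup "path" d).getD "" with hkey
  set onlyB := PySem.Set.diff kb ka with honlyB
  set onlyA := PySem.Set.diff ka kb with honlyA
  set both := PySem.Set.inter ka kb with hboth
  set diffs :=
    onlyB.map (fun p => [("path", p), ("reason", "missing_in_run1")])
    ++ onlyA.map (fun p => [("path", p), ("reason", "missing_in_run2")])
    ++ (both.filter (fun p => List.lookup p ca ≠ List.lookup p cb)).map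
        (fun p => [("path", p), ("reason", "checksum_mismatch")]) with hdiffs
  have halt : diff_checksums_py_alt ca cb = PySem.List.sorted diffs key := rfl
  rw [pvA_eq_flatMap, halt]
  symm
  apply PySem.List.sorted_eq_of_perm_of_pairwise_lt
  · -- permutation: flatMap over sorted union ~ diffs
    have h1 : ((PySem.List.sorted u (fun p => p)).flatMap (pvG ca cb)).Perm (u.flatMap (pvG ca cb)) :=
      (PySem.List.sorted_perm u _ _).flatMap (fun _ _ => List.Perm.refl _)
    have huPerm : u.Perm (onlyB ++ onlyA ++ both) := by
      rw [List.perm_ext_iff_of_nodup]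
      · intro x
        rw [hueq]
        simp only [honlyB, honlyA, hboth, List.mem_append, PySem.Set.mem_ofList,
          hka, hkb, PySem.Set.mem_diff, PySem.Set.mem_inter]
        tauto
      · rw [hueq]; exact PySem.Set.nodup_ofList _
      · rw [List.nodup_append, List.nodup_append]
        refine ⟨⟨PySem.Set.nodup_diff _ _ hkbN, PySem.Set.nodup_diff _ _ hkaN, ?_⟩,
          PySem.Set.nodup_inter _ _ hkaN, ?_⟩
        · intro x hx y hy
          rw [honlyB, PySem.Set.mem_diff] at hx
          rw [honlyA, PySem.Set.mem_diff] at hy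
          rintro rfl; exact hx.2 hy.1
        · intro x hx y hy
          rw [List.mem_append] at hx
          rw [hboth, PySem.Set.mem_inter] at hy
          rintro rfl
          rcases hx with hx | hx
          · rw [honlyB, PySem.Set.mem_diff] at hx; exact hx.2 hy.1
          · rw [honlyA, PySem.Set.mem_diff] at hx; exact hx.2 hy.2
    have h2 : (u.flatMap (pvG ca cb)).Perm ((onlyB ++ onlyA ++ both).flatMap (pvG ca cb)) :=
      huPerm.flatMap (fun _ _ => List.Perm.refl _)
    have h3 : (onlyB ++ onlyA ++ both).flatMap (pvG ca cb) = diffs := by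
      rw [List.flatMap_append, List.flatMap_append, hdiffs]
      congr 1
      congr 1
      · apply pvFlatMap_eq_map
        intro p hp
        rw [honlyB, PySem.Set.mem_diff] at hp
        simp only [hka, hkb, PySem.Set.mem_ofList] at hp
        unfold pvG
        rw [if_pos hp.2]
      · apply pvFlatMap_eq_map
        intro p hp
        rw [honlyA, PySem.Set.mem_diff] at hp
        simp only [hka, hkb, PySem.Set.mem_ofList] at hp
        unfold pvG
        rw [if_neg (by simpa using hp.1), if_pos hp.2]
      · apply pvFlatMap_ite_eq_filter_map
        intro p hp
        rw [hboth, PySem.Set.mem_inter] at hp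
        simp only [hka, hkb, PySem.Set.mem_ofList] at hp
        unfold pvG
        rw [if_neg (by simpa using hp.1), if_neg (by simpa using hp.2)]
        by_cases hne : List.lookup p ca ≠ List.lookup p cb
        · rw [if_pos hne, if_pos (by simpa using hne)]
        · rw [if_neg hne, if_neg (by simpa using hne)]
    exact h3 ▸ h1.trans h2
  · -- strict pairwise order on the keys of A's output
    apply pvPairwise_flatMap
    · rw [show (PySem.Set.ofList (ca.map Prod.fst)).union (cb.map Prod.fst)
            = PySem.Set.ofList (ca.map Prod.fst ++ cb.map Prod.fst) from by
          rw [PySem.Set.ofList_append]; rfl]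
      exact PySem.List.sorted_ofList_pairwise_lt _
    · exact fun p d hd => pvG_key ca cb p d hd
    · exact pvG_len ca cb
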